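-- pv_equiv track=rewrite | github.com/IncognitoPeter/informatyka_korki | moduł_4_tablice/zestaw_1/zadania_2D.py | najdluzszy_podciag_nwd
-- ===== SOURCE A (Python) =====
-- def nwd(a, b):
--     while b != 0:
--         a, b = b, a % b
--     return a
--
-- def najdluzszy_podciag_nwd(tablica):
--     max_dlugosc = 0
--     dlugosc = 0
--     poczatek = -1
--     for i in range(1, len(tablica)):
--         if nwd(tablica[i - 1], tablica[i]) == 1:
--             dlugosc += 1
--             if dlugosc > max_dlugosc:
--                 max_dlugosc = dlugosc
--                 poczatek = i - dlugosc
--         else: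
--             dlugosc = 0
--     if max_dlugosc > 0:
--         return max_dlugosc, poczatek
--     else:
--         return -1, -1
-- ===== SOURCE B (Python) =====
-- def nwd(a, b):
--     while b != 0:
--         a, b = b, a % b
--     return a
--
--
-- def najdluzszy_podciag_nwd(tablica):
--     # table of adjacent-coprimality flags
--     flags = [nwd(tablica[j], tablica[j + 1]) == 1 for j in range(len(tablica) - 1)]
--     # runs[j] = length of the run of consecutive True flags starting at j,
--     # computed in one backward pass
--     runs = []
--     r = 0
--     for f in reversed(flags):
--         r = r + 1 if f else 0
--         runs.append(r)
--     runs.reverse()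
--     best = max(runs, default=0)
--     if best > 0:
--         return best, runs.index(best)
--     return -1, -1
-- ===== Notes on version B (the rewrite author's own statement) =====
-- stated objective: alternative
-- what changed: Instead of A's single forward scan with incremental run-length/maximum bookkeeping, B first builds the boolean table of adjacent-coprimality flags, computes all suffix run lengths in one backward pass, and reads the answer off with max() and list.index().
import Mathlib
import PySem

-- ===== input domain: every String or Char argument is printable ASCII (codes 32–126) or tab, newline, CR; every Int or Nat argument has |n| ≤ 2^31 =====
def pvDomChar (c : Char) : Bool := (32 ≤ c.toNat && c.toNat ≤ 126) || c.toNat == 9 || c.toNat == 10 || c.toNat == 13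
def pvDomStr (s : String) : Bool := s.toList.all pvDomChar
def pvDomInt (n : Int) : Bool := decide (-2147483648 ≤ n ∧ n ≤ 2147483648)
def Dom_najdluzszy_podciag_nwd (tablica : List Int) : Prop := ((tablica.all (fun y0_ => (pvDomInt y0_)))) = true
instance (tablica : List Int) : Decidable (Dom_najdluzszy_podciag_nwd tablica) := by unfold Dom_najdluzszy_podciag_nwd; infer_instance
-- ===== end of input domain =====

-- B builds the table of adjacent-coprimality flags, then suffix run lengths in one
-- backward pass, and reads the answer off max/index (objective: alternative decomposition).

-- ===== PORT A =====
-- termination helper for the Euclid loop (Python's % has the divisor's sign)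
theorem pvModAbsLt (a b : Int) (hb : ¬ b = 0) : (PySem.Int.mod a b).natAbs < b.natAbs := by
  rcases lt_or_gt_of_ne hb with h | h
  · have := PySem.Int.mod_neg_bounds a h; omega
  · have h1 := PySem.Int.mod_lt a h; have h2 := PySem.Int.mod_nonneg a h; omega

def nwd (a b : Int) : Int :=
  if hb : b = 0 then a else nwd b (PySem.Int.mod a b)
termination_by b.natAbs
decreasing_by exact pvModAbsLt a b hb

def najdluzszy_podciag_nwd (tablica : List Int) : Int × Int :=
  let st := (PySem.List.pyRange 1 (tablica.length : Int) 1).foldl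
    (fun (st : Int × Int × Int) i =>
      if nwd (PySem.List.pyGetD tablica (i - 1) 0) (PySem.List.pyGetD tablica i 0) == 1 then
        let d := st.2.1 + 1
        if d > st.1 then (d, d, i - d) else (st.1, d, st.2.2)
      else (st.1, 0, st.2.2))
    (0, 0, -1)
  if st.1 > 0 then (st.1, st.2.2) else (-1, -1)

-- ===== PORT B =====
def najdluzszy_podciag_nwd_alt (tablica : List Int) : Int × Int :=
  let flags := (PySem.List.pyRange 0 ((tablica.length : Int) - 1) 1).map
    (fun j => nwd (PySem.List.pyGetD tablica j 0) (PySem.List.pyGetD tablica (j + 1) 0) == 1)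
  let runs := ((flags.reverse.foldl
    (fun (st : Int × List Int) f =>
      let r := if f then st.1 + 1 else 0
      (r, st.2 ++ [r])) ((0 : Int), ([] : List Int))).2).reverse
  let best := PySem.List.maxD runs (fun x => x) 0
  if best > 0 then (best, (((PySem.List.index? runs best).getD 0 : Nat) : Int)) else (-1, -1)

-- ===== PRECONDITION & SPEC =====
def Spec_najdluzszy_podciag_nwd (tablica : List Int) (out : Int × Int) : Prop := out = najdluzszy_podciag_nwd_alt tablica
instance (tablica : List Int) (out : Int × Int) : Decidable (Spec_najdluzszy_podciag_nwd tablica out) := by unfold Spec_najdluzszy_podciag_nwd; infer_instance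

-- ===== CLAIM (what is proved, stated in full; the proofs are below) =====
def Claim_equal_najdluzszy_podciag_nwd : Prop := ∀ (tablica : List Int), Dom_najdluzszy_podciag_nwd tablica → Spec_najdluzszy_podciag_nwd tablica (najdluzszy_podciag_nwd tablica)

-- ===== LEMMAS AND PROOFS =====

-- length of the leading run of `true`s
def pvLead : List Bool → Int
  | [] => 0
  | x :: q => if x then pvLead q + 1 else 0

def pvAllT (L : List Bool) : Bool := L.all (fun b => b)

-- length of the trailing run of `true`s
def pvTrail (L : List Bool) : Int := pvLead L.reverse

-- (lead, best run length, start index of the first best run) in one cons recursion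
def pvBms : List Bool → Int × Int × Int
  | [] => (0, 0, 0)
  | x :: q =>
    let b := pvBms q
    let r0 : Int := if x then b.1 + 1 else 0
    (r0, if r0 ≥ b.2.1 then (r0, 0) else (b.2.1, b.2.2 + 1))

-- suffix run lengths, cons form
def pvRuns : List Bool → List Int
  | [] => []
  | x :: q => (if x then pvLead q + 1 else 0) :: pvRuns q

-- the backward accumulation in port B
def pvSrun : Int → List Bool → List Int
  | _, [] => []
  | r, f :: q => (if f then r + 1 else 0) :: pvSrun (if f then r + 1 else 0) q

def pvFinal (r : Int) (L : List Bool) : Int := L.foldl (fun r f => if f then r + 1 else 0) r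

-- A's loop body and an index-carrying fold over the flag list
def pvAstep (st : Int × Int × Int) (p : Int × Bool) : Int × Int × Int :=
  if p.2 then
    let d := st.2.1 + 1
    if d > st.1 then (d, d, p.1 - d) else (st.1, d, st.2.2)
  else (st.1, 0, st.2.2)

def pvAfold : List Bool → Int → (Int × Int × Int) → Int × Int × Int
  | [], _, st => st
  | f :: rest, i, st => pvAfold rest (i + 1) (pvAstep st (i, f))

-- the adjacent-coprimality flags of tablica
def pvFlags (t : List Int) : List Bool :=
  (List.range (t.length - 1)).map
    (fun (j : Nat) => nwd (PySem.List.pyGetD t (j : Int) 0) (PySem.List.pyGetD t ((j : Int) + 1) 0) == 1)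

theorem pvBms_fst (L : List Bool) : (pvBms L).1 = pvLead L := by
  induction L with
  | nil => rfl
  | cons x q ih => simp [pvBms, pvLead, ih]

theorem pvLead_nonneg (L : List Bool) : 0 ≤ pvLead L := by
  induction L with
  | nil => simp [pvLead]
  | cons x q ih => simp [pvLead]; split <;> omega

theorem pvLead_le_len (L : List Bool) : pvLead L ≤ L.length := by
  induction L with
  | nil => simp [pvLead]
  | cons x q ih => have := pvLead_nonneg q; simp [pvLead]; split <;> omega

theorem pvAllT_iff (L : List Bool) : pvAllT L = true ↔ pvLead L = L.length := by
  induction L with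
  | nil => simp [pvAllT, pvLead]
  | cons x q ih =>
    have h1 := pvLead_le_len q
    have h2 := pvLead_nonneg q
    cases x <;> simp [pvAllT, pvLead] at * <;> [skip; rw [ih]] <;> omega

theorem pvTrail_nonneg (L : List Bool) : 0 ≤ pvTrail L := pvLead_nonneg _

theorem pvTrail_le_len (L : List Bool) : pvTrail L ≤ L.length := by
  have := pvLead_le_len L.reverse; simpa [pvTrail] using this

theorem pvLead_append_false (L : List Bool) : pvLead (L ++ [false]) = pvLead L := by
  induction L with
  | nil => rfl
  | cons x q ih => simp [pvLead, ih]

theorem pvLead_append_true (L : List Bool) :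
    pvLead (L ++ [true]) = if pvAllT L then (L.length : Int) + 1 else pvLead L := by
  induction L with
  | nil => simp [pvLead, pvAllT]
  | cons x q ih =>
    have h1 := pvLead_le_len q
    have h2 := pvLead_nonneg q
    have h3 := (pvAllT_iff q)
    cases x <;> simp [pvLead, pvAllT, ih] at * <;> split <;> push_cast <;> omega

theorem pvTrail_append (L : List Bool) (f : Bool) :
    pvTrail (L ++ [f]) = if f then pvTrail L + 1 else 0 := by
  cases f <;> simp [pvTrail, pvLead]

theorem pvBms_m_nonneg (L : List Bool) : 0 ≤ (pvBms L).2.1 := by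
  induction L with
  | nil => simp [pvBms]
  | cons x q ih =>
    simp only [pvBms]
    split <;> split <;> simp <;> omega

theorem pvBms_m_le_len (L : List Bool) : (pvBms L).2.1 ≤ L.length := by
  induction L with
  | nil => simp [pvBms]
  | cons x q ih =>
    have h0 := pvBms_fst q
    have h1 := pvLead_le_len q
    have h2 := pvLead_nonneg q
    simp [pvBms]; split <;> split <;> push_cast <;> omega

theorem pvAllT_reverse (L : List Bool) : pvAllT L.reverse = pvAllT L := by
  simp [pvAllT]

theorem pvTrail_cons (x : Bool) (q : List Bool) :
    pvTrail (x :: q) = if x && pvAllT q then (q.length : Int) + 1 else pvTrail q := by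
  have h : (x :: q).reverse = q.reverse ++ [x] := by simp
  cases x
  · simp [pvTrail, h, pvLead_append_false]
  · simp only [pvTrail, h, pvLead_append_true, pvAllT_reverse, List.length_reverse,
      Bool.true_and]

theorem pvTrail_allT (q : List Bool) (h : pvAllT q = true) : pvTrail q = (q.length : Int) := by
  have := (pvAllT_iff q.reverse).mp (by rw [pvAllT_reverse]; exact h)
  simpa [pvTrail] using this

-- S1: appending a non-coprime flag changes nothing in (lead, best, start)
theorem pvBms_append_false (L : List Bool) : pvBms (L ++ [false]) = pvBms L := by
  induction L with
  | nil => rfl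
  | cons x q ih => simp [pvBms, ih]

-- S2: appending a coprime flag extends the trailing run
theorem pvBms_append_true (L : List Bool) :
    pvBms (L ++ [true]) =
      (if pvAllT L then (L.length : Int) + 1 else pvLead L,
       max (pvBms L).2.1 (pvTrail L + 1),
       if pvTrail L + 1 > (pvBms L).2.1 then (L.length : Int) - pvTrail L else (pvBms L).2.2) := by
  induction L with
  | nil => decide
  | cons x q ih =>
    have hfst := pvBms_fst q
    have hlq1 := pvLead_nonneg q
    have hlq2 := pvLead_le_len q
    have htq1 := pvTrail_nonneg q
    have htq2 := pvTrail_le_len q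
    have hmq1 := pvBms_m_nonneg q
    have hmq2 := pvBms_m_le_len q
    have hallT := pvAllT_iff q
    have htall := pvTrail_allT q
    have hac : ∀ (y : Bool) (r : List Bool), pvAllT (y :: r) = (y && pvAllT r) := by
      intro y r; simp [pvAllT]
    simp only [List.cons_append, pvBms, ih, pvTrail_cons, hac, pvLead,
      List.length_cons, Prod.mk.injEq, hfst]
    rcases Bool.eq_false_or_eq_true (pvAllT q) with hall | hall <;> cases x
    all_goals simp only [hall, Bool.true_and, Bool.false_and, Bool.false_eq_true, ite_true, ite_false, Prod.mk.injEq]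
    all_goals (try have h9 := htall hall)
    all_goals (try have h8 := hallT.mp hall)
    all_goals (simp only [max_def]; split_ifs <;> simp only [Prod.mk.injEq, true_and, and_true] <;> push_cast at * <;> omega)

theorem pvAfold_append (L : List Bool) (f : Bool) (i : Int) (st : Int × Int × Int) :
    pvAfold (L ++ [f]) i st = pvAstep (pvAfold L i st) (i + L.length, f) := by
  induction L generalizing i st with
  | nil => simp [pvAfold]
  | cons f' rest ih => simp [pvAfold, ih]; ring_nf

-- the invariant of A's loop: best so far, trailing run, start of first best run
theorem pvMain (L : List Bool) :
    pvAfold L 1 (0, 0, -1) =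
      ((pvBms L).2.1, pvTrail L, if (pvBms L).2.1 = 0 then -1 else (pvBms L).2.2) := by
  induction L using List.reverseRecOn with
  | nil => decide
  | append_singleton L f ih =>
    rw [pvAfold_append, ih, pvTrail_append]
    have hm := pvBms_m_nonneg L
    have ht := pvTrail_nonneg L
    cases f
    · rw [pvBms_append_false]
      simp [pvAstep]
    · rw [pvBms_append_true]
      have hmax : max (pvBms L).2.1 (pvTrail L + 1)
          = if pvTrail L + 1 > (pvBms L).2.1 then pvTrail L + 1 else (pvBms L).2.1 := by
        rw [max_def]; split_ifs <;> omega
      rw [hmax]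
      simp only [pvAstep, if_true]
      by_cases hgt : pvTrail L + 1 > (pvBms L).2.1
      · simp only [if_pos hgt, if_neg (show ¬(pvTrail L + 1 = 0) by omega), Prod.mk.injEq]
        exact ⟨trivial, trivial, by omega⟩
      · simp only [if_neg hgt]

theorem najdluzszy_eq_afold (t : List Int) :
    najdluzszy_podciag_nwd t =
      (let st := pvAfold (pvFlags t) 1 (0, 0, -1);
       if st.1 > 0 then (st.1, st.2.2) else (-1, -1)) := by
  have hrange : ∀ (g : Nat → Bool) (n a : Nat) (st : Int × Int × Int),
      pvAfold ((List.range' a n).map g) ((a : Int) + 1) st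
        = (List.range' a n).foldl (fun (st : Int × Int × Int) (j : Nat) => pvAstep st ((j : Int) + 1, g j)) st := by
    intro g n
    induction n with
    | zero => intro a st; simp [pvAfold]
    | succ n ih =>
      intro a st
      rw [List.range'_succ]
      simp only [List.map_cons, pvAfold, List.foldl_cons]
      have := ih (a + 1) (pvAstep st ((a : Int) + 1, g a))
      push_cast at this ⊢
      rw [show (a : Int) + 1 + 1 = (a : Int) + 2 by ring] at this ⊢
      exact this
  have hpf : pvFlags t = (List.range' 0 (t.length - 1)).map
      (fun j : Nat => nwd (PySem.List.pyGetD t (j : Int) 0)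
        (PySem.List.pyGetD t ((j : Int) + 1) 0) == 1) := by
    unfold pvFlags; rw [List.range_eq_range']
  have h3 := hrange (fun j : Nat => nwd (PySem.List.pyGetD t (j : Int) 0)
    (PySem.List.pyGetD t ((j : Int) + 1) 0) == 1) (t.length - 1) 0 (0, 0, -1)
  rw [show ((0 : Nat) : Int) + 1 = 1 from by norm_num] at h3
  have hbody : ∀ (l : List Nat) (st0 : Int × Int × Int),
      l.foldl (fun (x : Int × Int × Int) (y : Nat) =>
        if (nwd (PySem.List.pyGetD t (1 + (y : Int) - 1) 0)
            (PySem.List.pyGetD t (1 + (y : Int)) 0) == 1) = true then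
          let d := x.2.1 + 1
          if d > x.1 then (d, d, 1 + (y : Int) - d) else (x.1, d, x.2.2)
        else (x.1, 0, x.2.2)) st0
      = l.foldl (fun (st : Int × Int × Int) (j : Nat) => pvAstep st ((j : Int) + 1,
          nwd (PySem.List.pyGetD t (j : Int) 0) (PySem.List.pyGetD t ((j : Int) + 1) 0) == 1)) st0 := by
    intro l
    induction l with
    | nil => intro st0; rfl
    | cons y l ih =>
      intro st0
      rw [List.foldl_cons, List.foldl_cons, ih]
      congr 1
      have h2 : (1 : Int) + (y : Int) = (y : Int) + 1 := by ring
      have h1 : (y : Int) + 1 - 1 = (y : Int) := by ring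
      simp only [pvAstep, h2, h1]
  unfold najdluzszy_podciag_nwd
  rw [PySem.List.pyRange_one]
  have hn : (((t.length : Int)) - 1).toNat = t.length - 1 := by omega
  rw [hn, List.range_eq_range', List.foldl_map, hpf, h3, hbody]

theorem pvSrun_eq_foldl (L : List Bool) : ∀ (r : Int) (acc : List Int),
    (L.foldl (fun (st : Int × List Int) f =>
      (if f then st.1 + 1 else 0, st.2 ++ [if f then st.1 + 1 else 0])) (r, acc)).2
      = acc ++ pvSrun r L := by
  induction L with
  | nil => intro r acc; simp [pvSrun]
  | cons f q ih => intro r acc; simp only [List.foldl_cons, pvSrun]; rw [ih]; simp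

theorem pvSrun_append (X Y : List Bool) : ∀ r : Int,
    pvSrun r (X ++ Y) = pvSrun r X ++ pvSrun (pvFinal r X) Y := by
  induction X with
  | nil => intro r; simp [pvSrun, pvFinal]
  | cons f q ih =>
    intro r
    simp only [List.cons_append, pvSrun]
    rw [ih]
    have : pvFinal r (f :: q) = pvFinal (if f then r + 1 else 0) q := by simp [pvFinal]
    rw [this]

theorem pvFinal_reverse (L : List Bool) : ∀ r : Int,
    pvFinal r L.reverse = if pvAllT L then r + L.length else pvLead L := by
  induction L with
  | nil => intro r; simp [pvFinal, pvAllT, pvLead]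
  | cons x q ih =>
    intro r
    have : pvFinal r (x :: q).reverse = if x then pvFinal r q.reverse + 1 else 0 := by
      simp [pvFinal]
    rw [this, ih]
    have h3 := (pvAllT_iff q)
    cases x <;> simp [pvAllT, pvLead] <;> split <;> omega

theorem pvRuns_eq (L : List Bool) : (pvSrun 0 L.reverse).reverse = pvRuns L := by
  induction L with
  | nil => rfl
  | cons x q ih =>
    have hrev : (x :: q).reverse = q.reverse ++ [x] := by simp
    rw [hrev, pvSrun_append, pvFinal_reverse]
    have hlead : (if pvAllT q then (0:Int) + q.length else pvLead q) = pvLead q := by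
      split
      · rw [(pvAllT_iff q).mp (by assumption)]; ring
      · rfl
    rw [hlead]
    simp [pvSrun, pvRuns, ih]

theorem pvMaxD_runs (L : List Bool) :
    PySem.List.maxD (pvRuns L) (fun x => x) 0 = (pvBms L).2.1 := by
  cases L with
  | nil => rfl
  | cons x q =>
    have hfold : ∀ (M : List Bool) (a : Int), 0 ≤ a →
        (pvRuns M).foldl max a = max a (pvBms M).2.1 := by
      intro M
      induction M with
      | nil => intro a ha; simp [pvRuns, pvBms]; omega
      | cons y r ih =>
        intro a ha
        have h0 := pvLead_nonneg r
        simp only [pvRuns, List.foldl_cons, pvBms, pvBms_fst]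
        rw [ih _ (by split <;> omega)]
        split <;> split <;> simp only [max_def] <;> split_ifs <;> omega
    have hr0 : 0 ≤ (if x then pvLead q + 1 else 0 : Int) := by
      have := pvLead_nonneg q; split <;> omega
    simp only [pvRuns, PySem.List.maxD, PySem.List.max?_id_cons, Option.getD_some]
    rw [hfold q _ hr0]
    simp only [pvBms, pvBms_fst]
    split <;> simp only [max_def] <;> split_ifs <;> omega

theorem pvIndex_runs (L : List Bool) (h : 0 < (pvBms L).2.1) :
    ∃ k : Nat, PySem.List.index? (pvRuns L) (pvBms L).2.1 = some k ∧ (k : Int) = (pvBms L).2.2 := by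
  induction L with
  | nil => simp [pvBms] at h
  | cons x q ih =>
    have hfst := pvBms_fst q
    have hmq := pvBms_m_nonneg q
    simp only [pvBms, hfst] at h ⊢
    simp only [pvRuns]
    by_cases hc : (if x = true then pvLead q + 1 else 0 : Int) ≥ (pvBms q).2.1
    · rw [if_pos hc] at h ⊢
      exact ⟨0, PySem.List.index?_cons_self _ _, rfl⟩
    · rw [if_neg hc] at h ⊢
      dsimp only at h ⊢
      push Not at hc
      obtain ⟨k, hk1, hk2⟩ := ih h
      refine ⟨k + 1, ?_, by push_cast; omega⟩
      rw [PySem.List.index?_cons_of_ne _ (by omega), hk1]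
      rfl

theorem alt_eq (t : List Int) :
    najdluzszy_podciag_nwd_alt t =
      (if 0 < (pvBms (pvFlags t)).2.1
       then ((pvBms (pvFlags t)).2.1, (pvBms (pvFlags t)).2.2) else (-1, -1)) := by
  unfold najdluzszy_podciag_nwd_alt
  simp only []
  have hflags : (PySem.List.pyRange 0 ((t.length : Int) - 1) 1).map
      (fun j => nwd (PySem.List.pyGetD t j 0) (PySem.List.pyGetD t (j + 1) 0) == 1)
      = pvFlags t := by
    rw [PySem.List.pyRange_one]
    have hn : (((t.length : Int)) - 1 - 0).toNat = t.length - 1 := by omega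
    rw [hn, List.map_map]
    unfold pvFlags
    rw [List.range_eq_range']
    congr 1
    funext k
    norm_num
  rw [hflags]
  rw [pvSrun_eq_foldl, List.nil_append, pvRuns_eq, pvMaxD_runs]
  have hm := pvBms_m_nonneg (pvFlags t)
  by_cases h : 0 < (pvBms (pvFlags t)).2.1
  · obtain ⟨k, hk1, hk2⟩ := pvIndex_runs (pvFlags t) h
    rw [if_pos h, if_pos (by omega), hk1]
    simp [hk2]
  · rw [if_neg (by omega), if_neg h]

-- ===== VERDICT (by name: the statement is the Claim_ definition above) =====
theorem najdluzszy_podciag_nwd_spec : Claim_equal_najdluzszy_podciag_nwd := by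
  intro t _
  unfold Spec_najdluzszy_podciag_nwd
  rw [najdluzszy_eq_afold, alt_eq, pvMain]
  have hm := pvBms_m_nonneg (pvFlags t)
  simp only []
  by_cases h : 0 < (pvBms (pvFlags t)).2.1
  · rw [if_pos h, if_pos h, if_neg (by omega)]
  · rw [if_neg h, if_neg (by omega)]
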